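-- pv_equiv track=rewrite | github.com/Tienanh204/Python-Code | Python Code/Lythuyet/P1-Kieudulieu-Vonglap-Ham-Toantu/Bai38-P1.py | sumExponent
-- ===== SOURCE A (Python) =====
-- def sumExponent(n):
--     cnt=0
--     temp=n
--     while(temp!=0):
--         cnt+=1
--         temp//=10
--     sum=0
--     while(n!=0):
--         sum+=(n%10)**cnt
--         n//=10
--     return sum
-- ===== SOURCE B (Python) =====
-- def sumExponent(n):
--     s = str(n)
--     cnt = len(s)
--     return sum(int(c) ** cnt for c in s)
-- ===== Notes on version B (the rewrite author's own statement) =====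
-- stated objective: idiomatic
-- what changed: Replaces A's two arithmetic digit-extraction loops (one to count digits, one to accumulate) with a single pass over str(n), taking the digit count as the string length.
import Mathlib
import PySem

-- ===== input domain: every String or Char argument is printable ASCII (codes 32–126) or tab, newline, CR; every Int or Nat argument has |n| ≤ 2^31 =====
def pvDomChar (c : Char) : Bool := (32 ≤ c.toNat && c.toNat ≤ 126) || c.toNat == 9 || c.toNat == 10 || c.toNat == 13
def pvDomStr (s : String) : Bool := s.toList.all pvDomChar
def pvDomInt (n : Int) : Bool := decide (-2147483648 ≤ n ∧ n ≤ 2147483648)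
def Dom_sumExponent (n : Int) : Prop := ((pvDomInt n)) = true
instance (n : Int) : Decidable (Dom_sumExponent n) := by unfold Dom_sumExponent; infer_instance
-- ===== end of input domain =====

-- B replaces A's two arithmetic digit-extraction loops by one idiomatic pass over str(n)
-- with the digit count taken as the string's length; equal on all n ≥ 0 (A loops forever on n < 0).

-- termination helper for the two while-loops of A (cited by name in decreasing_by)
theorem pvFloordivTenLt (t : Int) (h : 0 < t) :
    (PySem.Int.floordiv t 10).toNat < t.toNat := by
  have h1 : PySem.Int.floordiv t 10 < t :=
    (PySem.Int.floordiv_lt_iff_lt_mul (by omega)).mpr (by nlinarith)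
  have h2 : (0 : Int) ≤ PySem.Int.floordiv t 10 :=
    (PySem.Int.le_floordiv_iff_mul_le (by omega)).mpr (by omega)
  omega

-- ===== PORT A =====
-- while(temp != 0): cnt += 1; temp //= 10
-- (the final 'else cnt' branch is a totality guard only: Python diverges on temp < 0,
--  which Pre_ excludes; on temp ≥ 0 the guard is never the exit taken except temp = 0)
def sumExponentCount (temp cnt : Int) : Int :=
  if temp = 0 then cnt
  else if h : 0 < temp then sumExponentCount (PySem.Int.floordiv temp 10) (cnt + 1)
  else cnt
termination_by temp.toNat
decreasing_by exact pvFloordivTenLt temp h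

-- while(n != 0): sum += (n % 10) ** cnt; n //= 10   (cnt ≥ 0 always; ** ported via toNat)
def sumExponentSum (n cnt sum : Int) : Int :=
  if n = 0 then sum
  else if h : 0 < n then
    sumExponentSum (PySem.Int.floordiv n 10) cnt (sum + PySem.Int.mod n 10 ^ cnt.toNat)
  else sum
termination_by n.toNat
decreasing_by exact pvFloordivTenLt n h

def sumExponent (n : Int) : Int :=
  let cnt := sumExponentCount n 0
  sumExponentSum n cnt 0

-- ===== PORT B =====
-- s = str(n); cnt = len(s); return sum(int(c) ** cnt for c in s)
def sumExponent_alt (n : Int) : Int :=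
  let s := PySem.Int.toStr n
  let cnt := PySem.Str.len s
  s.toList.foldl (fun acc c => acc + ((PySem.Int.ofChars? [c]).getD 0) ^ cnt.toNat) 0

-- ===== PRECONDITION & SPEC =====
-- Pre_ excludes n < 0: there A's first while-loop never terminates (temp //= 10 is stuck at -1).
def Pre_sumExponent (n : Int) : Prop := 0 ≤ n
instance (n : Int) : Decidable (Pre_sumExponent n) := by unfold Pre_sumExponent; infer_instance
def pvWitness_sumExponent : Int := (153)

def Spec_sumExponent (n : Int) (out : Int) : Prop := out = sumExponent_alt n
instance (n : Int) (out : Int) : Decidable (Spec_sumExponent n out) := by unfold Spec_sumExponent; infer_instance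

-- ===== CLAIM (what is proved, stated in full; the proofs are below) =====
def Claim_equal_sumExponent : Prop := ∀ (n : Int), Dom_sumExponent n → Pre_sumExponent n → Spec_sumExponent n (sumExponent n)

-- ===== LEMMAS AND PROOFS =====

-- A's first loop counts the decimal digits
theorem sumExponentCount_eq (m : Nat) : ∀ (c : Int),
    sumExponentCount (m : Int) c = c + (Nat.digits 10 m).length := by
  induction m using Nat.strong_induction_on with
  | _ m ih =>
    intro c
    rcases Nat.eq_zero_or_pos m with h0 | hp
    · subst h0; simp [sumExponentCount]
    · rw [sumExponentCount]
      have hne : (m : Int) ≠ 0 := by exact_mod_cast Nat.pos_iff_ne_zero.mp hp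
      have hpos : (0 : Int) < m := by exact_mod_cast hp
      have hfd : PySem.Int.floordiv (m : Int) 10 = ((m / 10 : Nat) : Int) := by
        exact_mod_cast PySem.Int.floordiv_natCast m 10
      rw [if_neg hne, dif_pos hpos, hfd,
        ih (m / 10) (Nat.div_lt_self hp (by omega)) (c + 1),
        Nat.digits_def' (by omega : 1 < 10) hp]
      simp; omega

-- A's second loop sums d^cnt over the decimal digits
theorem sumExponentSum_eq (m : Nat) : ∀ (cnt s : Int),
    sumExponentSum (m : Int) cnt s
      = s + (List.map (fun d : Nat => (d : Int) ^ cnt.toNat) (Nat.digits 10 m)).sum := by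
  induction m using Nat.strong_induction_on with
  | _ m ih =>
    intro cnt s
    rcases Nat.eq_zero_or_pos m with h0 | hp
    · subst h0; simp [sumExponentSum]
    · rw [sumExponentSum]
      have hne : (m : Int) ≠ 0 := by exact_mod_cast Nat.pos_iff_ne_zero.mp hp
      have hpos : (0 : Int) < m := by exact_mod_cast hp
      have hfd : PySem.Int.floordiv (m : Int) 10 = ((m / 10 : Nat) : Int) := by
        exact_mod_cast PySem.Int.floordiv_natCast m 10
      have hmd : PySem.Int.mod (m : Int) 10 = ((m % 10 : Nat) : Int) := by
        exact_mod_cast PySem.Int.mod_natCast m 10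
      rw [if_neg hne, dif_pos hpos, hfd, hmd,
        ih (m / 10) (Nat.div_lt_self hp (by omega)) cnt _,
        Nat.digits_def' (by omega : 1 < 10) hp]
      simp; ring

-- Nat.toDigits (what str(n) prints) is the reversed digit list rendered through Nat.digitChar
theorem toDigitsCore_eq (f : Nat) : ∀ (m : Nat) (l : List Char), 0 < m → m ≤ f →
    Nat.toDigitsCore 10 f m l = ((Nat.digits 10 m).map Nat.digitChar).reverse ++ l := by
  induction f with
  | zero => intro m l hm hf; omega
  | succ f ih =>
    intro m l hm hf
    rw [Nat.toDigitsCore, Nat.digits_def' (by omega : 1 < 10) hm]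
    rcases Nat.eq_zero_or_pos (m / 10) with h0 | hp
    · simp [h0, Nat.digits_zero]
    · have : ¬ m / 10 = 0 := by omega
      simp only [this, if_false]
      rw [ih (m / 10) _ hp (by have := Nat.div_lt_self hm (by omega : 1 < 10); omega),
        Nat.digits_def'] <;> simp [hp]

theorem toDigits_eq (m : Nat) (hm : 0 < m) :
    Nat.toDigits 10 m = ((Nat.digits 10 m).map Nat.digitChar).reverse ++ [] := by
  rw [Nat.toDigits]
  exact toDigitsCore_eq (m + 1) m [] hm (by omega)

-- int(single decimal digit character) recovers the digit
theorem ofChars_digitChar (d : Nat) (hd : d < 10) :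
    (PySem.Int.ofChars? [Nat.digitChar d]).getD 0 = (d : Int) := by
  interval_cases d <;> decide

theorem sumExponent_alt_eq (m : Nat) (hm : 0 < m) :
    sumExponent_alt (m : Int)
      = (List.map (fun d : Nat => (d : Int) ^ (Nat.digits 10 m).length) (Nat.digits 10 m)).sum := by
  unfold sumExponent_alt
  have hneg : ¬ ((m : Int) < 0) := by exact Int.not_lt.mpr (Int.natCast_nonneg m)
  have htl : (PySem.Int.toStr (m : Int)).toList = Nat.toDigits 10 m := by
    rw [PySem.Int.toList_toStr, PySem.Int.toChars, if_neg hneg, Int.toNat_natCast]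
  simp only [PySem.Str.len_eq, htl, toDigits_eq m hm, List.append_nil]
  rw [PySem.List.foldl_add, List.map_reverse, List.map_map, List.sum_reverse,
    List.length_reverse, List.length_map]
  simp only [zero_add]
  congr 1
  apply List.map_congr_left
  intro d hd
  have hd10 : d < 10 := Nat.digits_lt_base (by omega) hd
  simp [Function.comp, ofChars_digitChar d hd10, Int.toNat_natCast]

-- ===== VERDICT (by name: the statement is the Claim_ definition above) =====
theorem sumExponent_spec : Claim_equal_sumExponent := by
  intro n _ hpre
  unfold Spec_sumExponent
  obtain ⟨m, rfl⟩ := Int.eq_ofNat_of_zero_le hpre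
  rcases Nat.eq_zero_or_pos m with h0 | hp
  · subst h0
    unfold sumExponent
    have h2 := sumExponentSum_eq 0 (sumExponentCount 0 0) 0
    norm_num at h2
    rw [Nat.cast_zero, h2]
    decide
  · unfold sumExponent
    rw [sumExponentCount_eq m 0, sumExponentSum_eq m _ 0, sumExponent_alt_eq m hp]
    simp
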